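-- pv_equiv track=rewrite | github.com/joestalker1/leetcode | src/main/scala/FacebookHackerCup/2021/Round1/WeakTypingChapter2.py | calc_switch_times
-- ===== SOURCE A (Python) =====
-- MOD = 10 ** 9 + 7
--
-- def calc_switch_times(w):
--     if len(w) <= 1:
--         return 0
--     n = len(w)
--     dp = [0] * n
--     left = [-1] * n
--     if w[0] != 'F':
--         left[0] = 0
--     for i in range(1, n):
--         if w[i] != 'F':
--             left[i] = i
--         else:
--             left[i] = left[i-1]
--
--     for i in range(1, n):
--         if w[i] != 'F' and left[i-1] >= 0 and w[i] != w[left[i-1]]: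
--             dp[i] = (dp[i-1] + left[i - 1] + 1) % MOD
--         else:
--             dp[i] = dp[i-1]
--     return sum(dp) % MOD
-- ===== SOURCE B (Python) =====
-- MOD = 10 ** 9 + 7
--
-- def calc_switch_times(w):
--     # One pass, O(1) extra space: each switch at position i contributes
--     # (left[i-1]+1)*(n-i) to sum(dp) by telescoping the prefix sums.
--     if len(w) <= 1:
--         return 0
--     n = len(w)
--     last = -1
--     acc = 0
--     for i in range(n):
--         if i >= 1 and w[i] != 'F' and last >= 0 and w[i] != w[last]:
--             acc += (last + 1) * (n - i)
--         if w[i] != 'F':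
--             last = i
--     return acc % MOD
-- ===== Notes on version B (the rewrite author's own statement) =====
-- stated objective: simpler
-- what changed: Replaced the two auxiliary arrays and two passes (left[] build, dp[] build, then sum(dp)) by a single pass keeping only a scalar last non-F index and an accumulator, using that sum(dp) telescopes to the sum over switch positions i of (left[i-1]+1)*(n-i).
import Mathlib
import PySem

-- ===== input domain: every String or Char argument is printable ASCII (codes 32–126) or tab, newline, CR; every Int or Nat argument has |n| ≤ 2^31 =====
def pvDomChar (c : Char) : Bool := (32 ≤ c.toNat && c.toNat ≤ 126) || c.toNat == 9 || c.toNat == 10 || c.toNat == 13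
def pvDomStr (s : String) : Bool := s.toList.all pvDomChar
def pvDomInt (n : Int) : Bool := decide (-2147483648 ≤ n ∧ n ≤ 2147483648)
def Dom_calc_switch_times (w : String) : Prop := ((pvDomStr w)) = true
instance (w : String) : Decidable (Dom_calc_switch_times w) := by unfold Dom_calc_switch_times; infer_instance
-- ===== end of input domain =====

-- B replaces A's two array-building passes plus sum(dp) by a single pass keeping only the
-- last non-'F' index and an accumulator of (last+1)*(n-i) per switch position (simpler, O(1) space).

def MODc : Int := 10 ^ 9 + 7

-- ===== PORT A =====
-- A's first loop: build the left[] array (index of most recent non-'F' position, or -1)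
def aLeft (l : List Char) (k : Nat) : List Int :=
  (List.range' 1 k).foldl
    (fun L i => if l.getD i ' ' ≠ 'F' then L.set i (i : Int) else L.set i (L.getD (i - 1) 0))
    (if l.getD 0 ' ' ≠ 'F' then (List.replicate l.length (-1 : Int)).set 0 0
     else List.replicate l.length (-1 : Int))

-- A's second loop: build the dp[] array
def aDp (l : List Char) (left : List Int) (k : Nat) : List Int :=
  (List.range' 1 k).foldl
    (fun D i =>
      if l.getD i ' ' ≠ 'F' ∧ 0 ≤ left.getD (i - 1) 0 ∧
          l.getD i ' ' ≠ l.getD (left.getD (i - 1) 0).toNat ' '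
      then D.set i (PySem.Int.mod (D.getD (i - 1) 0 + left.getD (i - 1) 0 + 1) MODc)
      else D.set i (D.getD (i - 1) 0))
    (List.replicate l.length (0 : Int))

def calc_switch_times (w : String) : Int :=
  if w.toList.length ≤ 1 then 0
  else
    PySem.Int.mod
      (aDp w.toList (aLeft w.toList (w.toList.length - 1)) (w.toList.length - 1)).sum MODc

-- ===== PORT B =====
-- B's single loop over i in range(n): state = (last, acc)
def bLoop (l : List Char) (k : Nat) : Int × Int :=
  (List.range k).foldl
    (fun st i =>
      (if l.getD i ' ' ≠ 'F' then (i : Int) else st.1,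
       if 1 ≤ i ∧ l.getD i ' ' ≠ 'F' ∧ 0 ≤ st.1 ∧ l.getD i ' ' ≠ l.getD st.1.toNat ' '
       then st.2 + (st.1 + 1) * ((l.length : Int) - (i : Int)) else st.2))
    (-1, 0)

def calc_switch_times_alt (w : String) : Int :=
  if w.toList.length ≤ 1 then 0
  else PySem.Int.mod (bLoop w.toList w.toList.length).2 MODc

-- ===== PRECONDITION & SPEC =====
def Spec_calc_switch_times (w : String) (out : Int) : Prop := out = calc_switch_times_alt w
instance (w : String) (out : Int) : Decidable (Spec_calc_switch_times w out) := by unfold Spec_calc_switch_times; infer_instance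

-- ===== CLAIM (what is proved, stated in full; the proofs are below) =====
def Claim_equal_calc_switch_times : Prop := ∀ (w : String), Dom_calc_switch_times w → Spec_calc_switch_times w (calc_switch_times w)

-- ===== LEMMAS AND PROOFS =====

-- functional description of A's left[] array entries
def leftF (l : List Char) : Nat → Int
  | 0 => if l.getD 0 ' ' ≠ 'F' then 0 else -1
  | i+1 => if l.getD (i+1) ' ' ≠ 'F' then ((i+1 : Nat) : Int) else leftF l i

-- the switch contribution at each position (0 at position 0)
def dF (l : List Char) : Nat → Int
  | 0 => 0
  | i+1 => if l.getD (i+1) ' ' ≠ 'F' ∧ 0 ≤ leftF l i ∧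
              l.getD (i+1) ' ' ≠ l.getD (leftF l i).toNat ' '
           then leftF l i + 1 else 0

-- functional description of A's dp[] array entries
def dpF (l : List Char) : Nat → Int
  | 0 => 0
  | i+1 => if l.getD (i+1) ' ' ≠ 'F' ∧ 0 ≤ leftF l i ∧
              l.getD (i+1) ' ' ≠ l.getD (leftF l i).toNat ' '
           then PySem.Int.mod (dpF l i + leftF l i + 1) MODc else dpF l i

def sumF (f : Nat → Int) : Nat → Int
  | 0 => 0
  | k+1 => sumF f k + f k

lemma MODc_pos : (0 : Int) < MODc := by unfold MODc; norm_num

lemma getD_set_lt {L : List Int} {i j : Nat} {v : Int} (h : i < L.length) :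
    (L.set i v).getD j 0 = if j = i then v else L.getD j 0 := by
  by_cases hij : j = i
  · subst hij; simp [List.getD_eq_getElem?_getD, h]
  · simp [List.getD_eq_getElem?_getD, Ne.symm hij, hij]

lemma range'_one_concat (k : Nat) : List.range' 1 (k + 1) = List.range' 1 k ++ [k + 1] := by
  rw [List.range'_concat]; simp [Nat.add_comm]

lemma aLeft_spec (l : List Char) : ∀ k, k < l.length →
    (aLeft l k).length = l.length ∧
    ∀ j, j < l.length → (aLeft l k).getD j 0 = if j ≤ k then leftF l j else -1 := by
  intro k
  induction k with
  | zero =>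
    intro hk
    have hinit : aLeft l 0 =
        (if l.getD 0 ' ' ≠ 'F' then (List.replicate l.length (-1 : Int)).set 0 0
         else List.replicate l.length (-1 : Int)) := rfl
    constructor
    · rw [hinit]; split_ifs <;> simp
    · intro j hj
      rw [hinit]
      by_cases h0 : l.getD 0 ' ' ≠ 'F'
      · rw [if_pos h0, getD_set_lt (by simpa using hk)]
        by_cases hj0 : j = 0
        · subst hj0
          rw [if_pos rfl, if_pos (Nat.le_refl 0),
            show leftF l 0 = if l.getD 0 ' ' ≠ 'F' then 0 else -1 from rfl, if_pos h0]
        · rw [if_neg hj0, if_neg (by omega)]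
          simp [List.getD_eq_getElem?_getD, hj]
      · rw [if_neg h0]
        by_cases hj0 : j = 0
        · subst hj0
          rw [if_pos (Nat.le_refl 0),
            show leftF l 0 = if l.getD 0 ' ' ≠ 'F' then 0 else -1 from rfl, if_neg h0]
          simp [List.getD_eq_getElem?_getD, hj]
        · rw [if_neg (by omega)]
          simp [List.getD_eq_getElem?_getD, hj]
  | succ k ih =>
    intro hk
    have ihh := ih (by omega)
    have hlen : (aLeft l k).length = l.length := ihh.1
    have hstep : aLeft l (k+1) =
        (if l.getD (k+1) ' ' ≠ 'F' then (aLeft l k).set (k+1) ((k+1 : Nat) : Int)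
         else (aLeft l k).set (k+1) ((aLeft l k).getD ((k+1) - 1) 0)) := by
      unfold aLeft
      rw [range'_one_concat, List.foldl_append]
      rfl
    have hk1 : k + 1 < (aLeft l k).length := by omega
    constructor
    · rw [hstep]; split_ifs <;> simp [hlen]
    · intro j hj
      rw [hstep]
      have hgk : (aLeft l k).getD k 0 = leftF l k := by
        rw [ihh.2 k (by omega), if_pos (Nat.le_refl k)]
      by_cases hc : l.getD (k+1) ' ' ≠ 'F'
      · rw [if_pos hc, getD_set_lt hk1]
        by_cases hjk : j = k + 1
        · subst hjk
          rw [if_pos rfl, if_pos (Nat.le_refl _),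
            show leftF l (k+1) = if l.getD (k+1) ' ' ≠ 'F' then ((k+1 : Nat) : Int)
              else leftF l k from rfl, if_pos hc]
        · rw [if_neg hjk, ihh.2 j hj]
          by_cases hle : j ≤ k
          · rw [if_pos hle, if_pos (by omega)]
          · rw [if_neg hle, if_neg (by omega)]
      · rw [if_neg hc, getD_set_lt hk1]
        by_cases hjk : j = k + 1
        · subst hjk
          rw [if_pos rfl, if_pos (Nat.le_refl _)]
          have : (k + 1) - 1 = k := by omega
          rw [this, hgk,
            show leftF l (k+1) = if l.getD (k+1) ' ' ≠ 'F' then ((k+1 : Nat) : Int)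
              else leftF l k from rfl, if_neg hc]
        · rw [if_neg hjk, ihh.2 j hj]
          by_cases hle : j ≤ k
          · rw [if_pos hle, if_pos (by omega)]
          · rw [if_neg hle, if_neg (by omega)]

lemma aDp_spec (l : List Char) (left : List Int)
    (hL : ∀ j, j < l.length → left.getD j 0 = leftF l j) : ∀ k, k < l.length →
    (aDp l left k).length = l.length ∧
    ∀ j, j < l.length → (aDp l left k).getD j 0 = if j ≤ k then dpF l j else 0 := by
  intro k
  induction k with
  | zero =>
    intro hk
    have hinit : aDp l left 0 = List.replicate l.length (0 : Int) := rfl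
    constructor
    · rw [hinit]; simp
    · intro j hj
      rw [hinit]
      by_cases hj0 : j = 0
      · subst hj0
        simp [List.getD_eq_getElem?_getD, hj, dpF]
      · rw [if_neg (by omega)]
        simp [List.getD_eq_getElem?_getD, hj]
  | succ k ih =>
    intro hk
    have ihh := ih (by omega)
    have hlen : (aDp l left k).length = l.length := ihh.1
    have hstep : aDp l left (k+1) =
        (if l.getD (k+1) ' ' ≠ 'F' ∧ 0 ≤ left.getD ((k+1) - 1) 0 ∧
            l.getD (k+1) ' ' ≠ l.getD (left.getD ((k+1) - 1) 0).toNat ' '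
         then (aDp l left k).set (k+1)
            (PySem.Int.mod ((aDp l left k).getD ((k+1) - 1) 0 + left.getD ((k+1) - 1) 0 + 1) MODc)
         else (aDp l left k).set (k+1) ((aDp l left k).getD ((k+1) - 1) 0)) := by
      unfold aDp
      rw [range'_one_concat, List.foldl_append]
      rfl
    have hk1 : k + 1 < (aDp l left k).length := by omega
    have hsub : (k + 1) - 1 = k := by omega
    have hgk : (aDp l left k).getD k 0 = dpF l k := by
      rw [ihh.2 k (by omega), if_pos (Nat.le_refl k)]
    have hLk : left.getD k 0 = leftF l k := hL k (by omega)
    constructor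
    · rw [hstep]; split_ifs <;> simp [hlen]
    · intro j hj
      rw [hstep, hsub, hgk, hLk]
      by_cases hc : l.getD (k+1) ' ' ≠ 'F' ∧ 0 ≤ leftF l k ∧
          l.getD (k+1) ' ' ≠ l.getD (leftF l k).toNat ' '
      · rw [if_pos hc, getD_set_lt hk1]
        by_cases hjk : j = k + 1
        · subst hjk
          rw [if_pos rfl, if_pos (Nat.le_refl _)]
          rw [show dpF l (k+1) = if l.getD (k+1) ' ' ≠ 'F' ∧ 0 ≤ leftF l k ∧
              l.getD (k+1) ' ' ≠ l.getD (leftF l k).toNat ' '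
              then PySem.Int.mod (dpF l k + leftF l k + 1) MODc else dpF l k from rfl]
          rw [if_pos hc]
        · rw [if_neg hjk, ihh.2 j hj]
          by_cases hle : j ≤ k
          · rw [if_pos hle, if_pos (by omega)]
          · rw [if_neg hle, if_neg (by omega)]
      · rw [if_neg hc, getD_set_lt hk1]
        by_cases hjk : j = k + 1
        · subst hjk
          rw [if_pos rfl, if_pos (Nat.le_refl _)]
          rw [show dpF l (k+1) = if l.getD (k+1) ' ' ≠ 'F' ∧ 0 ≤ leftF l k ∧
              l.getD (k+1) ' ' ≠ l.getD (leftF l k).toNat ' '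
              then PySem.Int.mod (dpF l k + leftF l k + 1) MODc else dpF l k from rfl]
          rw [if_neg hc]
        · rw [if_neg hjk, ihh.2 j hj]
          by_cases hle : j ≤ k
          · rw [if_pos hle, if_pos (by omega)]
          · rw [if_neg hle, if_neg (by omega)]

lemma map_range_sum (f : Nat → Int) : ∀ k, ((List.range k).map f).sum = sumF f k := by
  intro k
  induction k with
  | zero => simp [sumF]
  | succ k ih => rw [List.range_succ]; simp [ih, sumF]

lemma sum_of_getD (D : List Int) (f : Nat → Int)
    (h : ∀ j, j < D.length → D.getD j 0 = f j) : D.sum = sumF f D.length := by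
  have hD : D = (List.range D.length).map f := by
    apply List.ext_getElem (by simp)
    intro j h1 h2
    simp only [List.getElem_map, List.getElem_range]
    have hh := h j h1
    rw [List.getD_eq_getElem?_getD, List.getElem?_eq_getElem h1] at hh
    simpa using hh
  calc D.sum = ((List.range D.length).map f).sum := by rw [← hD]
    _ = sumF f D.length := map_range_sum f D.length

lemma sumF_succ (f : Nat → Int) (k : Nat) : sumF f (k+1) = sumF f k + f k := rfl

lemma sumF_congr {f g : Nat → Int} : ∀ k, (∀ t, t < k → f t = g t) → sumF f k = sumF g k := by
  intro k
  induction k with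
  | zero => intro _; rfl
  | succ k ih =>
    intro h
    rw [sumF_succ, sumF_succ, ih (fun t ht => h t (by omega)), h k (by omega)]

lemma sumF_add (f g : Nat → Int) : ∀ k, sumF (fun t => f t + g t) k = sumF f k + sumF g k := by
  intro k
  induction k with
  | zero => rfl
  | succ k ih => rw [sumF_succ, sumF_succ, sumF_succ, ih]; ring

lemma dpF_modeq (l : List Char) : ∀ i, Int.ModEq MODc (dpF l i) (sumF (dF l) (i+1)) := by
  intro i
  induction i with
  | zero => simp [dpF, dF, sumF]
  | succ i ih =>
    by_cases hc : l.getD (i+1) ' ' ≠ 'F' ∧ 0 ≤ leftF l i ∧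
        l.getD (i+1) ' ' ≠ l.getD (leftF l i).toNat ' '
    · have h1 : dpF l (i+1) = PySem.Int.mod (dpF l i + leftF l i + 1) MODc := by
        rw [show dpF l (i+1) = if l.getD (i+1) ' ' ≠ 'F' ∧ 0 ≤ leftF l i ∧
            l.getD (i+1) ' ' ≠ l.getD (leftF l i).toNat ' '
            then PySem.Int.mod (dpF l i + leftF l i + 1) MODc else dpF l i from rfl, if_pos hc]
      have h2 : dF l (i+1) = leftF l i + 1 := by
        rw [show dF l (i+1) = if l.getD (i+1) ' ' ≠ 'F' ∧ 0 ≤ leftF l i ∧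
            l.getD (i+1) ' ' ≠ l.getD (leftF l i).toNat ' '
            then leftF l i + 1 else 0 from rfl, if_pos hc]
      rw [h1, PySem.Int.mod_eq_emod_of_pos MODc_pos, sumF_succ, h2]
      have hmm : Int.ModEq MODc ((dpF l i + leftF l i + 1) % MODc) (dpF l i + leftF l i + 1) :=
        Int.emod_emod_of_dvd _ dvd_rfl
      refine hmm.trans ?_
      have : dpF l i + leftF l i + 1 = dpF l i + (leftF l i + 1) := by ring
      rw [this]
      exact ih.add_right _
    · have h1 : dpF l (i+1) = dpF l i := by
        rw [show dpF l (i+1) = if l.getD (i+1) ' ' ≠ 'F' ∧ 0 ≤ leftF l i ∧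
            l.getD (i+1) ' ' ≠ l.getD (leftF l i).toNat ' '
            then PySem.Int.mod (dpF l i + leftF l i + 1) MODc else dpF l i from rfl, if_neg hc]
      have h2 : dF l (i+1) = 0 := by
        rw [show dF l (i+1) = if l.getD (i+1) ' ' ≠ 'F' ∧ 0 ≤ leftF l i ∧
            l.getD (i+1) ' ' ≠ l.getD (leftF l i).toNat ' '
            then leftF l i + 1 else 0 from rfl, if_neg hc]
      rw [h1, sumF_succ, h2, add_zero]
      exact ih

lemma sum_dpF_modeq (l : List Char) : ∀ k,
    Int.ModEq MODc (sumF (dpF l) k) (sumF (fun j => sumF (dF l) (j+1)) k) := by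
  intro k
  induction k with
  | zero => rfl
  | succ k ih => exact ih.add (dpF_modeq l k)

lemma sumF_swap (d : Nat → Int) : ∀ k,
    sumF (fun j => sumF d (j+1)) k = sumF (fun t => d t * ((k : Int) - (t : Int))) k := by
  intro k
  induction k with
  | zero => rfl
  | succ k ih =>
    have h1 : sumF (fun t => d t * (((k+1 : Nat) : Int) - (t : Int))) k
        = sumF (fun t => d t * (((k : Nat) : Int) - (t : Int)) + d t) k := by
      apply sumF_congr
      intro t _
      push_cast
      ring
    have e1 : sumF (fun j => sumF d (j+1)) (k+1)
        = sumF (fun j => sumF d (j+1)) k + sumF d (k+1) := rfl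
    have e2 : sumF (fun t => d t * (((k+1 : Nat) : Int) - (t : Int))) (k+1)
        = sumF (fun t => d t * (((k+1 : Nat) : Int) - (t : Int))) k
          + d k * (((k+1 : Nat) : Int) - ((k : Nat) : Int)) := rfl
    have h2 : d k * (((k+1 : Nat) : Int) - ((k : Nat) : Int)) = d k := by push_cast; ring
    rw [e1, e2, ih, h1, sumF_add, h2, sumF_succ d k]
    ring

lemma bLoop_spec (l : List Char) : ∀ k, k ≤ l.length →
    (bLoop l k).1 = (if k = 0 then -1 else leftF l (k - 1)) ∧
    (bLoop l k).2 = sumF (fun t => dF l t * ((l.length : Int) - (t : Int))) k := by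
  intro k
  induction k with
  | zero => intro _; exact ⟨rfl, rfl⟩
  | succ k ih =>
    intro hk
    have ihh := ih (by omega)
    have hstep1 : (bLoop l (k+1)).1
        = if l.getD k ' ' ≠ 'F' then (k : Int) else (bLoop l k).1 := by
      unfold bLoop
      rw [List.range_succ, List.foldl_append]
      rfl
    have hstep2 : (bLoop l (k+1)).2
        = if 1 ≤ k ∧ l.getD k ' ' ≠ 'F' ∧ 0 ≤ (bLoop l k).1 ∧
              l.getD k ' ' ≠ l.getD (bLoop l k).1.toNat ' '
          then (bLoop l k).2 + ((bLoop l k).1 + 1) * ((l.length : Int) - (k : Int))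
          else (bLoop l k).2 := by
      unfold bLoop
      rw [List.range_succ, List.foldl_append]
      rfl
    constructor
    · rw [hstep1, ihh.1, if_neg (Nat.succ_ne_zero k), show (k + 1) - 1 = k from rfl]
      match k with
      | 0 =>
        rw [show (if (0 : Nat) = 0 then (-1 : Int) else leftF l (0 - 1)) = -1 from rfl,
          show leftF l 0 = if l.getD 0 ' ' ≠ 'F' then 0 else -1 from rfl]
        by_cases hc : l.getD 0 ' ' ≠ 'F'
        · rw [if_pos hc, if_pos hc]
          norm_num
        · rw [if_neg hc, if_neg hc]
      | m+1 =>
        rw [if_neg (Nat.succ_ne_zero m), show (m + 1) - 1 = m from rfl,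
          show leftF l (m+1) = if l.getD (m+1) ' ' ≠ 'F' then ((m+1 : Nat) : Int)
            else leftF l m from rfl]
    · rw [hstep2, ihh.1, ihh.2]
      match k with
      | 0 =>
        norm_num [dF, sumF]
      | m+1 =>
        rw [if_neg (Nat.succ_ne_zero m), show (m + 1) - 1 = m from rfl,
          sumF_succ (fun t => dF l t * ((l.length : Int) - (t : Int))) (m+1)]
        have hdF : dF l (m+1) = if l.getD (m+1) ' ' ≠ 'F' ∧ 0 ≤ leftF l m ∧
            l.getD (m+1) ' ' ≠ l.getD (leftF l m).toNat ' '
            then leftF l m + 1 else 0 := rfl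
        by_cases hc : l.getD (m+1) ' ' ≠ 'F' ∧ 0 ≤ leftF l m ∧
            l.getD (m+1) ' ' ≠ l.getD (leftF l m).toNat ' '
        · rw [if_pos (And.intro (by omega) hc), hdF, if_pos hc]
        · rw [if_neg (fun h => hc h.2), hdF, if_neg hc, zero_mul, add_zero]

-- main pointwise equality
lemma ports_eq (w : String) : calc_switch_times w = calc_switch_times_alt w := by
  unfold calc_switch_times calc_switch_times_alt
  by_cases h : w.toList.length ≤ 1
  · rw [if_pos h, if_pos h]
  · rw [if_neg h, if_neg h]
    set l := w.toList with hl
    have hn : 2 ≤ l.length := by omega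
    have hLspec := aLeft_spec l (l.length - 1) (by omega)
    have hL : ∀ j, j < l.length → (aLeft l (l.length - 1)).getD j 0 = leftF l j := by
      intro j hj
      rw [hLspec.2 j hj, if_pos (by omega)]
    have hDspec := aDp_spec l (aLeft l (l.length - 1)) hL (l.length - 1) (by omega)
    have hsum : (aDp l (aLeft l (l.length - 1)) (l.length - 1)).sum = sumF (dpF l) l.length := by
      have := sum_of_getD (aDp l (aLeft l (l.length - 1)) (l.length - 1)) (dpF l)
        (fun j hj => by
          rw [hDspec.2 j (by rw [← hDspec.1]; exact hj), if_pos (by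
            have := hDspec.1; omega)])
      rw [this, hDspec.1]
    have hB := (bLoop_spec l l.length (Nat.le_refl _)).2
    rw [hsum, hB]
    rw [PySem.Int.mod_eq_emod_of_pos MODc_pos, PySem.Int.mod_eq_emod_of_pos MODc_pos]
    have hcong : Int.ModEq MODc (sumF (dpF l) l.length)
        (sumF (fun t => dF l t * ((l.length : Int) - (t : Int))) l.length) := by
      refine (sum_dpF_modeq l l.length).trans ?_
      rw [sumF_swap (dF l) l.length]
    exact hcong

-- ===== VERDICT (by name: the statement is the Claim_ definition above) =====
theorem calc_switch_times_spec : Claim_equal_calc_switch_times := by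
  intro w _
  unfold Spec_calc_switch_times
  exact ports_eq w
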